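-- pv_equiv track=rewrite | github.com/ppp5649/programmers | Level 0/chicken_coupon.py | solution
-- ===== SOURCE A (Python) =====
-- def solution(chicken):
--     service_chicken = chicken//10
--     extra_coupon = (chicken//10) + (chicken%10)
--
--     while True:
--         if extra_coupon < 10:
--             break
--         else:
--             service_chicken += extra_coupon//10
--             extra_coupon = (extra_coupon//10) + (extra_coupon%10)
--
--     return service_chicken
-- ===== SOURCE B (Python) =====
-- def solution(chicken):
--     # Closed form: each bonus chicken retires 9 coupons net, so the
--     # total bonus count for chicken >= 1 is (chicken - 1) // 9.
--     if chicken < 10: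
--         return 0
--     return (chicken - 1) // 9
-- ===== Notes on version B (the rewrite author's own statement) =====
-- stated objective: simpler
-- what changed: Replaces A's coupon-folding while-loop with a guarded O(1) closed-form division by 9.
-- outside the precondition, e.g. on solution(-5): A returns -1, B returns 0
import Mathlib
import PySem

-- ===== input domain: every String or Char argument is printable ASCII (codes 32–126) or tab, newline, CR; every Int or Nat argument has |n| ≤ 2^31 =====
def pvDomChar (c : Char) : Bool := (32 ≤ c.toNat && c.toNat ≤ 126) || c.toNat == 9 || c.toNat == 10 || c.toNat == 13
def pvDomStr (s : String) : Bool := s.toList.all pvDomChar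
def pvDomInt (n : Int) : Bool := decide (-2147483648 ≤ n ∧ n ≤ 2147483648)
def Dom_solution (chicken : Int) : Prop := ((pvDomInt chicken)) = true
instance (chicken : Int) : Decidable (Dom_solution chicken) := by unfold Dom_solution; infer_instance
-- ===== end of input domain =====

-- B replaces A's coupon-folding loop with a guarded closed-form division by 9 (simpler);
-- Pre_ restricts to the natural domain 0 ≤ chicken (a chicken count; A returns negative
-- values for negative input which B does not mirror).


-- ===== PORT A =====
-- the while-loop of A over the state (service_chicken, extra_coupon)
def solutionLoop (service_chicken extra_coupon : Int) : Int :=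
  if extra_coupon < 10 then service_chicken
  else solutionLoop (service_chicken + PySem.Int.floordiv extra_coupon 10)
                    (PySem.Int.floordiv extra_coupon 10 + PySem.Int.mod extra_coupon 10)
termination_by extra_coupon.toNat
decreasing_by
  rw [PySem.Int.floordiv_eq_ediv_of_pos (by omega), PySem.Int.mod_eq_emod_of_pos (by omega)]
  omega

def solution (chicken : Int) : Int :=
  solutionLoop (PySem.Int.floordiv chicken 10)
               (PySem.Int.floordiv chicken 10 + PySem.Int.mod chicken 10)

-- ===== PORT B =====
def solution_alt (chicken : Int) : Int :=
  if chicken < 10 then 0 else PySem.Int.floordiv (chicken - 1) 9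

-- ===== PRECONDITION & SPEC =====
-- Pre_ restricts to the natural domain of a chicken count (0 ≤ chicken); A also returns
-- (negative) values for negative input, which B does not reproduce.
def Pre_solution (chicken : Int) : Prop := 0 ≤ chicken
instance (chicken : Int) : Decidable (Pre_solution chicken) := by unfold Pre_solution; infer_instance
def pvWitness_solution : Int := (57)

def Spec_solution (chicken : Int) (out : Int) : Prop := out = solution_alt chicken
instance (chicken : Int) (out : Int) : Decidable (Spec_solution chicken out) := by unfold Spec_solution; infer_instance

-- ===== CLAIM (what is proved, stated in full; the proofs are below) =====
def Claim_equal_solution : Prop := ∀ (chicken : Int), Dom_solution chicken → Pre_solution chicken → Spec_solution chicken (solution chicken)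

-- ===== LEMMAS AND PROOFS =====
theorem solutionLoop_closed (service_chicken extra_coupon : Int) (he : 0 ≤ extra_coupon) :
    solutionLoop service_chicken extra_coupon =
      service_chicken + (if extra_coupon < 10 then 0 else (extra_coupon - 1) / 9) := by
  induction service_chicken, extra_coupon using solutionLoop.induct with
  | case1 s e h => rw [solutionLoop]; simp [h]
  | case2 s e h ih =>
    rw [solutionLoop, if_neg h]
    rw [PySem.Int.floordiv_eq_ediv_of_pos (by omega : (0:Int) < 10),
        PySem.Int.mod_eq_emod_of_pos (by omega : (0:Int) < 10)] at ih ⊢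
    rw [ih (by omega)]
    split_ifs <;> omega

theorem solution_spec : Claim_equal_solution := by
  intro chicken _ hpre
  unfold Pre_solution at hpre
  unfold Spec_solution solution solution_alt
  rw [PySem.Int.floordiv_eq_ediv_of_pos (by omega : (0:Int) < 10),
      PySem.Int.mod_eq_emod_of_pos (by omega : (0:Int) < 10)]
  rw [solutionLoop_closed _ _ (by omega)]
  rcases lt_or_ge chicken 10 with h | h
  · rw [if_pos h]; split_ifs <;> omega
  · rw [if_neg (show ¬ chicken < 10 by omega),
        PySem.Int.floordiv_eq_ediv_of_pos (by omega : (0:Int) < 9)]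
    have hc : chicken - 1 = (chicken / 10 + chicken % 10 - 1) + (chicken / 10) * 9 := by omega
    have h9 : (chicken - 1) / 9 = (chicken / 10 + chicken % 10 - 1) / 9 + chicken / 10 := by
      rw [hc, Int.add_mul_ediv_right _ _ (by omega : (9:Int) ≠ 0)]
    split_ifs with h2
    · have : (chicken / 10 + chicken % 10 - 1) / 9 = 0 := by
        apply Int.ediv_eq_zero_of_lt <;> omega
      omega
    · omega
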